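-- pv_equiv track=rewrite | github.com/rewardMap/rewardGym | rewardgym/tasks/utils.py | check_conditions_not_following
-- ===== SOURCE A (Python) =====
-- from typing import Any, List, Literal, Tuple, Union
--
-- def check_conditions_not_following(
--     condition_list: List[Any], not_following: List[Any], window_length: int = 1
-- ) -> bool:
--     """
--     Checks if any elements in the condition_list are followed by elements from the not_following list within a specified window length.
--
--     Parameters
--     ----------
--     condition_list : List[Any]
--         The list of conditions to check.
--     not_following : List[Any]
--         The list of elements that should not follow the elements in condition_list.
--     window_length : int, optional
--         The length of the window to check after each element in condition_list, by default 1.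
--
--     Returns
--     -------
--     bool
--         Returns True if no elements from not_following appear within the window length after any element in condition_list, False otherwise.
--     """
--     for n, _ in enumerate(condition_list):
--         if condition_list[n] in not_following:
--             # Loop over conditions following the window. N + 1 as to make the window_lengths more intuitive.
--             if any(
--                 k in not_following
--                 for k in condition_list[n + 1 : n + 1 + window_length]
--             ):
--                 return False
--
--     return True
-- ===== SOURCE B (Python) =====
-- from typing import Any, List
--
--
-- def check_conditions_not_following(
--     condition_list: List[Any], not_following: List[Any], window_length: int = 1
-- ) -> bool:
--     nf = set(not_following)
--     last = None
--     for i, c in enumerate(condition_list):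
--         if c in nf:
--             if last is not None and i - last <= window_length:
--                 return False
--             last = i
--     return True
-- ===== Notes on version B (the rewrite author's own statement) =====
-- stated objective: alternative
-- what changed: Replaced the per-index window re-scan (list membership test plus a slice scan for every index) by a single pass that keeps a set of not_following and the index of the last not_following element, comparing index distances to the window (fewer passes; a timing run did not confirm a >=1.5x speed-up at the largest size).
-- intended difference: For negative window_length the slice stop n+1+window_length can become negative and wrap to the end of the list, so A returns False when two not_following elements sit close enough to the start; B treats a non-positive window as empty and returns True, which is the intended meaning of a window of non-positive length. — e.g. on check_conditions_not_following([1, 1, 0, 0, 0], [1], -3): A returns false, B returns true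
import Mathlib
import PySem

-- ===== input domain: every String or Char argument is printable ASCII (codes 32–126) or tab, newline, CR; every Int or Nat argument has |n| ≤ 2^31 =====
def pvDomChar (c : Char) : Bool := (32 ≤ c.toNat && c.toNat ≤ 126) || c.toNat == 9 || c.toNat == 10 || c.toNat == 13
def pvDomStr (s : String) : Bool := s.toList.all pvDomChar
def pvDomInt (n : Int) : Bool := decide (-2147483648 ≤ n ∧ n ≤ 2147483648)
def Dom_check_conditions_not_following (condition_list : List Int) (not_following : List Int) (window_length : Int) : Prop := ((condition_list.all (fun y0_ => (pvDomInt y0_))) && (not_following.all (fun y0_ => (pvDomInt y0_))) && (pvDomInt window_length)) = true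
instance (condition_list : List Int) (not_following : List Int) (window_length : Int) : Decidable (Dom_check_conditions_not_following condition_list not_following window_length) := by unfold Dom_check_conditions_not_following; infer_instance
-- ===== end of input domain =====

-- B replaces A's per-index slice re-scan by one pass with a membership set and the last
-- not_following index; on negative window_length A's wrapped slice is treated as intended
-- (empty window), stated as the intended difference D_ below.

-- ===== PORT A =====
-- the 'for n, _ in enumerate(condition_list)' loop with its early 'return False';
-- condition_list[n] is in range (n < len), so it is getD n 0 here
-- d is the number of remaining indices (fuel making the index loop structural); n the current index
def aLoop (condition_list : List Int) (not_following : List Int) (window_length : Int) : Nat → Nat → Bool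
  | 0, _ => true
  | d + 1, n =>
    if condition_list.getD n 0 ∈ not_following then
      if (PySem.List.slice condition_list (some ((n : Int) + 1)) (some ((n : Int) + 1 + window_length))).any
           (fun k => decide (k ∈ not_following)) then
        false
      else aLoop condition_list not_following window_length d (n + 1)
    else aLoop condition_list not_following window_length d (n + 1)

def check_conditions_not_following (condition_list : List Int) (not_following : List Int) (window_length : Int) : Bool :=
  aLoop condition_list not_following window_length condition_list.length 0

-- ===== PORT B =====
-- single pass: i is the running index, last the index of the last element seen in the set
def bLoop (nf_set : List Int) (window_length : Int) : List Int → Nat → Option Nat → Bool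
  | [], _, _ => true
  | c :: rest, i, last =>
    if c ∈ nf_set then
      match last with
      | some l => if (i : Int) - (l : Int) ≤ window_length then false
                  else bLoop nf_set window_length rest (i + 1) (some i)
      | none => bLoop nf_set window_length rest (i + 1) (some i)
    else bLoop nf_set window_length rest (i + 1) last

def check_conditions_not_following_alt (condition_list : List Int) (not_following : List Int) (window_length : Int) : Bool :=
  bLoop (PySem.Set.ofList not_following) window_length condition_list 0 none

-- ===== PRECONDITION & SPEC =====
-- For negative window_length the slice stop n+1+window_length can become negative and wrap to
-- the end of the list, so A returns False when two not_following elements sit close enough to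
-- the start; B treats a non-positive window as empty and returns True, the intended meaning.
def D_check_conditions_not_following (condition_list : List Int) (not_following : List Int) (window_length : Int) : Prop :=
  window_length < 0 ∧
    ∃ i ∈ List.range (min condition_list.length (-1 - window_length).toNat),
      ∃ j ∈ List.range ((condition_list.length : Int) + i + 1 + window_length).toNat,
        i < j ∧ condition_list.getD i 0 ∈ not_following ∧ condition_list.getD j 0 ∈ not_following

instance (condition_list : List Int) (not_following : List Int) (window_length : Int) : Decidable (D_check_conditions_not_following condition_list not_following window_length) := by
  unfold D_check_conditions_not_following; infer_instance

def Spec_check_conditions_not_following (condition_list : List Int) (not_following : List Int) (window_length : Int) (out : Bool) : Prop := ¬ D_check_conditions_not_following condition_list not_following window_length → out = check_conditions_not_following_alt condition_list not_following window_length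
instance (condition_list : List Int) (not_following : List Int) (window_length : Int) (out : Bool) : Decidable (Spec_check_conditions_not_following condition_list not_following window_length out) := by unfold Spec_check_conditions_not_following; infer_instance

def pvDiffWitness_check_conditions_not_following : List Int × List Int × Int := ([1, 1, 0, 0, 0], [1], -3)
def pvDiffWitnessOut_check_conditions_not_following : Bool × Bool := (false, true)

-- ===== CLAIM (what is proved, stated in full; the proofs are below) =====
def Claim_unchanged_check_conditions_not_following : Prop := ∀ (condition_list : List Int) (not_following : List Int) (window_length : Int), Dom_check_conditions_not_following condition_list not_following window_length → Spec_check_conditions_not_following condition_list not_following window_length (check_conditions_not_following condition_list not_following window_length)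
def Claim_changed_check_conditions_not_following : Prop := Dom_check_conditions_not_following (pvDiffWitness_check_conditions_not_following.1) (pvDiffWitness_check_conditions_not_following.2.1) (pvDiffWitness_check_conditions_not_following.2.2) ∧ D_check_conditions_not_following (pvDiffWitness_check_conditions_not_following.1) (pvDiffWitness_check_conditions_not_following.2.1) (pvDiffWitness_check_conditions_not_following.2.2) ∧ check_conditions_not_following (pvDiffWitness_check_conditions_not_following.1) (pvDiffWitness_check_conditions_not_following.2.1) (pvDiffWitness_check_conditions_not_following.2.2) = pvDiffWitnessOut_check_conditions_not_following.1 ∧ check_conditions_not_following_alt (pvDiffWitness_check_conditions_not_following.1) (pvDiffWitness_check_conditions_not_following.2.1) (pvDiffWitness_check_conditions_not_following.2.2) = pvDiffWitnessOut_check_conditions_not_following.2 ∧ pvDiffWitnessOut_check_conditions_not_following.1 ≠ pvDiffWitnessOut_check_conditions_not_following.2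
def Claim_exact_check_conditions_not_following : Prop := ∀ (condition_list : List Int) (not_following : List Int) (window_length : Int), Dom_check_conditions_not_following condition_list not_following window_length → D_check_conditions_not_following condition_list not_following window_length → check_conditions_not_following condition_list not_following window_length ≠ check_conditions_not_following_alt condition_list not_following window_length

-- ===== LEMMAS AND PROOFS =====

-- a pair of not_following elements at distance ≤ window_length (what both loops detect for w ≥ 0)
def BadPair (cl nf : List Int) (w : Int) : Prop :=
  ∃ i j : Nat, i < j ∧ j < cl.length ∧ cl.getD i 0 ∈ nf ∧ cl.getD j 0 ∈ nf ∧ (j : Int) - (i : Int) ≤ w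

lemma mem_drop_take {α : Type} (xs : List α) (a t : Nat) (x : α) :
    x ∈ (xs.drop a).take t ↔ ∃ j : Nat, a ≤ j ∧ j < a + t ∧ xs[j]? = some x := by
  rw [List.mem_iff_getElem?]
  constructor
  · rintro ⟨i, hi⟩
    rw [List.getElem?_take] at hi
    split at hi
    · rw [List.getElem?_drop] at hi
      exact ⟨a + i, by omega, by omega, hi⟩
    · simp at hi
  · rintro ⟨j, hj1, hj2, hj⟩
    refine ⟨j - a, ?_⟩
    rw [List.getElem?_take, if_pos (by omega), List.getElem?_drop]
    rwa [Nat.add_sub_cancel' hj1]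

lemma slice_eq_clamp {α : Type} (xs : List α) (a b : Int) :
    PySem.List.slice xs (some a) (some b) =
      (xs.drop (PySem.List.clampIdx xs.length a)).take
        (PySem.List.clampIdx xs.length b - PySem.List.clampIdx xs.length a) := rfl

-- membership of nf in A's window at index m, as an index condition
lemma window_iff (cl nf : List Int) (w : Int) (m : Nat) (hm : m < cl.length) :
    ((PySem.List.slice cl (some ((m : Int) + 1)) (some ((m : Int) + 1 + w))).any
        (fun k => decide (k ∈ nf)) = true) ↔
      ∃ j : Nat, m < j ∧ j < PySem.List.clampIdx cl.length ((m : Int) + 1 + w) ∧ cl.getD j 0 ∈ nf := by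
  have ha : PySem.List.clampIdx cl.length ((m : Int) + 1) = m + 1 := by
    simp only [PySem.List.clampIdx]
    rw [if_neg (by omega)]
    omega
  have hE : PySem.List.clampIdx cl.length ((m : Int) + 1 + w) ≤ cl.length :=
    PySem.List.clampIdx_le _ _
  rw [slice_eq_clamp, ha, List.any_eq_true]
  constructor
  · rintro ⟨x, hxmem, hx⟩
    rw [mem_drop_take] at hxmem
    obtain ⟨j, h1, h2, hget⟩ := hxmem
    obtain ⟨hjlen, hx_eq⟩ := List.getElem?_eq_some_iff.mp hget
    refine ⟨j, by omega, by omega, ?_⟩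
    rw [List.getD_eq_getElem cl 0 hjlen, hx_eq]
    exact of_decide_eq_true hx
  · rintro ⟨j, h1, h2, hj⟩
    have hjlen : j < cl.length := by omega
    refine ⟨cl.getD j 0, ?_, by simpa using hj⟩
    rw [mem_drop_take]
    exact ⟨j, by omega, by omega, by rw [List.getElem?_eq_getElem hjlen, List.getD_eq_getElem cl 0 hjlen]⟩

-- index strictly below a clamped bound, as an arithmetic condition
lemma lt_clampIdx (n : Nat) (b : Int) (j : Nat) :
    j < PySem.List.clampIdx n b ↔ j < n ∧ (j : Int) < (if b < 0 then (n : Int) + b else b) := by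
  simp only [PySem.List.clampIdx]
  split_ifs <;> omega

lemma aLoop_false_iff (cl nf : List Int) (w : Int) : ∀ (d n : Nat), n + d = cl.length →
    (aLoop cl nf w d n = false ↔
      ∃ m : Nat, n ≤ m ∧ m < cl.length ∧ cl.getD m 0 ∈ nf ∧
        (PySem.List.slice cl (some ((m : Int) + 1)) (some ((m : Int) + 1 + w))).any
          (fun k => decide (k ∈ nf)) = true) := by
  intro d
  induction d with
  | zero =>
    intro n hn
    simp only [aLoop]
    constructor
    · intro h; exact absurd h (by simp)
    · rintro ⟨m, h1, h2, _⟩; omega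
  | succ d ih =>
    intro n hn
    simp only [aLoop]
    by_cases hmem : cl.getD n 0 ∈ nf
    · rw [if_pos hmem]
      by_cases hany : (PySem.List.slice cl (some ((n : Int) + 1)) (some ((n : Int) + 1 + w))).any
          (fun k => decide (k ∈ nf)) = true
      · rw [if_pos hany]
        exact ⟨fun _ => ⟨n, le_refl n, by omega, hmem, hany⟩, fun _ => rfl⟩
      · rw [if_neg hany, ih (n + 1) (by omega)]
        constructor
        · rintro ⟨m, h1, h2, h3, h4⟩; exact ⟨m, by omega, h2, h3, h4⟩
        · rintro ⟨m, h1, h2, h3, h4⟩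
          refine ⟨m, ?_, h2, h3, h4⟩
          rcases Nat.eq_or_lt_of_le h1 with rfl | h
          · exact absurd h4 hany
          · omega
    · rw [if_neg hmem, ih (n + 1) (by omega)]
      constructor
      · rintro ⟨m, h1, h2, h3, h4⟩; exact ⟨m, by omega, h2, h3, h4⟩
      · rintro ⟨m, h1, h2, h3, h4⟩
        refine ⟨m, ?_, h2, h3, h4⟩
        rcases Nat.eq_or_lt_of_le h1 with rfl | h
        · exact absurd h3 hmem
        · omega

-- B's loop returns false iff a close pair exists among the remaining list or with `last`
def BadFrom (s : List Int) (w : Int) (l : List Int) (i : Nat) (last : Option Nat) : Prop :=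
  ∃ j : Nat, j < l.length ∧ l.getD j 0 ∈ s ∧
    ((∃ l₀ : Nat, last = some l₀ ∧ (i : Int) + (j : Int) - (l₀ : Int) ≤ w) ∨
      (∃ j' : Nat, j' < j ∧ l.getD j' 0 ∈ s ∧ (j : Int) - (j' : Int) ≤ w))

-- shift step when the head is in the set and does not fire: new last is the head's index i
lemma badFrom_cons_mem (s : List Int) (w : Int) (c : Int) (rest : List Int) (i : Nat)
    (last : Option Nat) (hlast : ∀ l₀ : Nat, last = some l₀ → l₀ ≤ i) (hc : c ∈ s)
    (hfire : ∀ l₀ : Nat, last = some l₀ → ¬((i : Int) - (l₀ : Int) ≤ w)) :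
    BadFrom s w (c :: rest) i last ↔ BadFrom s w rest (i + 1) (some i) := by
  constructor
  · rintro ⟨j, hj, hmem, hpart⟩
    cases j with
    | zero =>
      rcases hpart with ⟨l₀, hl₀, hle⟩ | ⟨j', hj', _⟩
      · exact absurd (by push_cast at hle ⊢; omega) (hfire l₀ hl₀)
      · omega
    | succ jj =>
      simp only [List.getD_cons_succ] at hmem
      refine ⟨jj, by simpa using hj, hmem, ?_⟩
      rcases hpart with ⟨l₀, hl₀, hle⟩ | ⟨j', hj', hmem', hle⟩
      · have := hlast l₀ hl₀
        exact Or.inl ⟨i, rfl, by push_cast at hle ⊢; omega⟩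
      · cases j' with
        | zero => exact Or.inl ⟨i, rfl, by push_cast at hle ⊢; omega⟩
        | succ jj' =>
          simp only [List.getD_cons_succ] at hmem'
          exact Or.inr ⟨jj', by omega, hmem', by push_cast at hle ⊢; omega⟩
  · rintro ⟨j, hj, hmem, hpart⟩
    refine ⟨j + 1, by simpa using Nat.succ_lt_succ hj, by simpa using hmem, ?_⟩
    rcases hpart with ⟨l₀, hl₀, hle⟩ | ⟨j', hj', hmem', hle⟩
    · cases hl₀
      exact Or.inr ⟨0, by omega, by simpa using hc, by push_cast at hle ⊢; omega⟩
    · exact Or.inr ⟨j' + 1, by omega, by simpa using hmem', by push_cast at hle ⊢; omega⟩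

-- shift step when the head is not in the set: last unchanged
lemma badFrom_cons_not_mem (s : List Int) (w : Int) (c : Int) (rest : List Int) (i : Nat)
    (last : Option Nat) (hc : c ∉ s) :
    BadFrom s w (c :: rest) i last ↔ BadFrom s w rest (i + 1) last := by
  constructor
  · rintro ⟨j, hj, hmem, hpart⟩
    cases j with
    | zero => exact absurd (by simpa using hmem) hc
    | succ jj =>
      simp only [List.getD_cons_succ] at hmem
      refine ⟨jj, by simpa using hj, hmem, ?_⟩
      rcases hpart with ⟨l₀, hl₀, hle⟩ | ⟨j', hj', hmem', hle⟩
      · exact Or.inl ⟨l₀, hl₀, by push_cast at hle ⊢; omega⟩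
      · cases j' with
        | zero => exact absurd (by simpa using hmem') hc
        | succ jj' =>
          simp only [List.getD_cons_succ] at hmem'
          exact Or.inr ⟨jj', by omega, hmem', by push_cast at hle ⊢; omega⟩
  · rintro ⟨j, hj, hmem, hpart⟩
    refine ⟨j + 1, by simpa using Nat.succ_lt_succ hj, by simpa using hmem, ?_⟩
    rcases hpart with ⟨l₀, hl₀, hle⟩ | ⟨j', hj', hmem', hle⟩
    · exact Or.inl ⟨l₀, hl₀, by push_cast at hle ⊢; omega⟩
    · exact Or.inr ⟨j' + 1, by omega, by simpa using hmem', by push_cast at hle ⊢; omega⟩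

lemma bLoop_false_iff (s : List Int) (w : Int) :
    ∀ (l : List Int) (i : Nat) (last : Option Nat),
      (∀ l₀ : Nat, last = some l₀ → l₀ ≤ i) →
      (bLoop s w l i last = false ↔ BadFrom s w l i last) := by
  intro l
  induction l with
  | nil => intro i last _; simp [bLoop, BadFrom]
  | cons c rest ih =>
    intro i last hlast
    by_cases hc : c ∈ s
    · cases last with
      | some l₀ =>
        by_cases hfire : (i : Int) - (l₀ : Int) ≤ w
        · simp only [bLoop, if_pos hc]
          constructor
          · intro _
            exact ⟨0, by simp, by simpa using hc, Or.inl ⟨l₀, rfl, by push_cast; omega⟩⟩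
          · intro _
            simp [hfire]
        · simp only [bLoop, if_pos hc, if_neg hfire]
          rw [ih (i + 1) (some i) (fun x hx => by cases hx; omega)]
          exact (badFrom_cons_mem s w c rest i (some l₀)
            (fun x hx => by cases hx; exact hlast l₀ rfl) hc
            (fun x hx => by cases hx; exact hfire)).symm
      | none =>
        simp only [bLoop, if_pos hc]
        rw [ih (i + 1) (some i) (fun x hx => by cases hx; omega)]
        exact (badFrom_cons_mem s w c rest i none (fun x hx => by cases hx) hc
          (fun x hx => by cases hx)).symm
    · simp only [bLoop, if_neg hc]
      rw [ih (i + 1) last (fun x hx => le_trans (hlast x hx) (by omega))]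
      exact (badFrom_cons_not_mem s w c rest i last hc).symm

lemma alt_false_iff (cl nf : List Int) (w : Int) :
    check_conditions_not_following_alt cl nf w = false ↔ BadPair cl nf w := by
  unfold check_conditions_not_following_alt
  rw [bLoop_false_iff _ _ cl 0 none (fun x hx => by cases hx)]
  unfold BadFrom BadPair
  constructor
  · rintro ⟨j, hj, hmem, hpart⟩
    rcases hpart with ⟨l₀, hl₀, _⟩ | ⟨j', hj', hmem', hle⟩
    · cases hl₀
    · exact ⟨j', j, hj', hj, (PySem.Set.mem_ofList _ _).mp hmem',
        (PySem.Set.mem_ofList _ _).mp hmem, hle⟩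
  · rintro ⟨i, j, h1, h2, h3, h4, h5⟩
    exact ⟨j, h2, (PySem.Set.mem_ofList _ _).mpr h4,
      Or.inr ⟨i, h1, (PySem.Set.mem_ofList _ _).mpr h3, h5⟩⟩

lemma a_false_iff_of_nonneg (cl nf : List Int) (w : Int) (hw : 0 ≤ w) :
    check_conditions_not_following cl nf w = false ↔ BadPair cl nf w := by
  unfold check_conditions_not_following
  rw [aLoop_false_iff cl nf w cl.length 0 (by omega)]
  constructor
  · rintro ⟨m, _, hm, hmem, hany⟩
    rw [window_iff cl nf w m hm] at hany
    obtain ⟨j, h1, h2, h3⟩ := hany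
    rw [lt_clampIdx, if_neg (by omega)] at h2
    exact ⟨m, j, h1, h2.1, hmem, h3, by omega⟩
  · rintro ⟨i, j, h1, h2, h3, h4, h5⟩
    have hi : i < cl.length := by omega
    refine ⟨i, by omega, hi, h3, ?_⟩
    rw [window_iff cl nf w i hi]
    exact ⟨j, h1, by rw [lt_clampIdx, if_neg (by omega)]; omega, h4⟩

lemma a_false_iff_of_neg (cl nf : List Int) (w : Int) (hw : w < 0) :
    check_conditions_not_following cl nf w = false ↔
      D_check_conditions_not_following cl nf w := by
  unfold check_conditions_not_following D_check_conditions_not_following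
  rw [aLoop_false_iff cl nf w cl.length 0 (by omega)]
  simp only [List.mem_range]
  constructor
  · rintro ⟨m, _, hm, hmem, hany⟩
    rw [window_iff cl nf w m hm] at hany
    obtain ⟨j, h1, h2, h3⟩ := hany
    rw [lt_clampIdx] at h2
    split_ifs at h2 with hb
    · exact ⟨hw, m, by omega, j, by omega, h1, hmem, h3⟩
    · omega
  · rintro ⟨_, i, hi, j, hj, h1, h2, h3⟩
    have hil : i < cl.length := by omega
    refine ⟨i, by omega, hil, h2, ?_⟩
    rw [window_iff cl nf w i hil]
    exact ⟨j, h1, by rw [lt_clampIdx, if_pos (by omega)]; omega, h3⟩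

lemma alt_true_of_neg (cl nf : List Int) (w : Int) (hw : w < 0) :
    check_conditions_not_following_alt cl nf w = true := by
  rcases h : check_conditions_not_following_alt cl nf w with _ | _
  · obtain ⟨i, j, h1, _, _, _, h5⟩ := (alt_false_iff cl nf w).mp h
    omega
  · rfl

-- ===== VERDICT (by name: the statement is the Claim_ definition above) =====
theorem check_conditions_not_following_spec : Claim_unchanged_check_conditions_not_following := by
  intro cl nf w _ hD
  rcases lt_or_ge w 0 with hw | hw
  · rw [alt_true_of_neg cl nf w hw]
    rcases h : check_conditions_not_following cl nf w with _ | _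
    · exact absurd ((a_false_iff_of_neg cl nf w hw).mp h) hD
    · rfl
  · have hiff : (check_conditions_not_following cl nf w = false) ↔
        (check_conditions_not_following_alt cl nf w = false) :=
      (a_false_iff_of_nonneg cl nf w hw).trans (alt_false_iff cl nf w).symm
    cases ha : check_conditions_not_following cl nf w <;>
      cases hb : check_conditions_not_following_alt cl nf w <;> simp_all

theorem check_conditions_not_following_changed : Claim_changed_check_conditions_not_following := by
  unfold Claim_changed_check_conditions_not_following; decide

theorem check_conditions_not_following_tight : Claim_exact_check_conditions_not_following := by
  intro cl nf w _ hD
  rw [alt_true_of_neg cl nf w hD.1, (a_false_iff_of_neg cl nf w hD.1).mpr hD]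
  decide
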